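-- pv_equiv track=rewrite | github.com/here0009/LeetCode | Python/1040_MovingStonesUntilConsecutiveII.py | numMovesStonesII
-- ===== SOURCE A (Python) =====
-- def numMovesStonesII(stones):
--     """
--     sort stones 1st
--     max move: use gap as possible as we can: the 1st gap or the last gap can not be used because we remvoe end stones 1st, other gap can all be used if we move the stone from this end to that end
--     s.....s....ss..........ss....s
--     so the max moves is max(stones[n-1] - stones[1] - (n - 2), stones[n-2] - stones[0] - (n -2))
--     for the min move, think of size slide along the stones, find the min stones need to be moved
--     """
--     stones.sort()
--     n = len(stones)
--     max_moves = max(stones[n - 1] - stones[1] - (n - 2), stones[n - 2] - stones[0] - (n -2))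
--     i = 0
--     min_moves = n
--     for j in range(n):
--         while stones[j] - stones[i] >= n:  # can not form a window of size n - 1
--             i += 1
--         if stones[j] - stones[i] == n - 2 and j - i == n - 2:  # a continous stone of size n - 1, we can not move the end directly, because then it will also be an end. we have to form a gap 1st, then move then end, 2 moves
--             min_moves = min(min_moves, 2)
--         else:
--             min_moves = min(min_moves, n - (j - i + 1))
--     return [min_moves, max_moves]
-- ===== SOURCE B (Python) =====
-- import bisect
--
-- def numMovesStonesII(stones):
--     stones.sort()
--     n = len(stones)
--     max_moves = max(stones[n - 1] - stones[1], stones[n - 2] - stones[0]) - (n - 2)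
--
--     def window_cost(j):
--         # leftmost stone that fits in a value-window of width n ending at stones[j]
--         i = bisect.bisect_left(stones, stones[j] - n + 1)
--         if j - i == n - 2 and stones[j] - stones[i] == n - 2:
--             return 2
--         return n - (j - i + 1)
--
--     return [min(map(window_cost, range(n))), max_moves]
-- ===== Notes on version B (the rewrite author's own statement) =====
-- stated objective: alternative
-- what changed: A's stateful amortized two-pointer sliding window (a while loop advancing a persistent left index) is replaced by a stateless bisect_left binary search per right boundary, with the minimum taken over a map instead of a mutable accumulator.
import Mathlib
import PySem

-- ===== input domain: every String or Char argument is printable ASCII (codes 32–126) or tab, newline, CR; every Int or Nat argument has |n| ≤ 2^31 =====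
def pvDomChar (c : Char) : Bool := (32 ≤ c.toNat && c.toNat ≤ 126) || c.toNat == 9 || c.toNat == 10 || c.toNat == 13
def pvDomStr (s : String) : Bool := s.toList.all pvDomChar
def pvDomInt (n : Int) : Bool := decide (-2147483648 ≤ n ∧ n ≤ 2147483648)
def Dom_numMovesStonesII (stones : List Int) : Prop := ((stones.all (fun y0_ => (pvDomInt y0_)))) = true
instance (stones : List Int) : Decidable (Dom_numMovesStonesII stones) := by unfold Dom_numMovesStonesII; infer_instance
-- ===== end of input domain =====

-- B replaces A's stateful amortized two-pointer scan by a stateless binary search (bisect_left)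
-- per right boundary; same results (equivalence is about the RETURN value; both sort the input
-- list in place in Python).

-- ===== PORT A =====
-- the 'while stones[j] - stones[i] >= n: i += 1' loop (fuel = len(stones) suffices: i never passes j)
def advA (s : List Int) (n : Int) (j : Nat) : Nat → Nat → Nat
  | 0, i => i
  | fuel+1, i =>
    if PySem.List.pyGetD s (j : Int) 0 - PySem.List.pyGetD s (i : Int) 0 ≥ n then
      advA s n j fuel (i + 1)
    else i

def numMovesStonesII (stones : List Int) : List Int :=
  let s := PySem.List.sorted stones (fun x => x)
  let n : Int := (s.length : Int)
  let max_moves := max (PySem.List.pyGetD s (n - 1) 0 - PySem.List.pyGetD s 1 0 - (n - 2))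
                       (PySem.List.pyGetD s (n - 2) 0 - PySem.List.pyGetD s 0 0 - (n - 2))
  let st := (List.range s.length).foldl
    (fun (st : Nat × Int) j =>
      let i := advA s n j s.length st.1
      if PySem.List.pyGetD s (j : Int) 0 - PySem.List.pyGetD s (i : Int) 0 = n - 2 ∧
         (j : Int) - (i : Int) = n - 2 then
        (i, min st.2 2)
      else
        (i, min st.2 (n - ((j : Int) - (i : Int) + 1))))
    (0, n)
  [st.2, max_moves]

-- ===== PORT B =====
-- Python's min() over a nonempty sequence (first element, then fold)
def pyMin1 : List Int → Int
  | [] => 0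
  | h :: t => t.foldl min h

def windowCost (s : List Int) (n : Int) (j : Nat) : Int :=
  let i := PySem.List.bisectLeft s (PySem.List.pyGetD s (j : Int) 0 - n + 1)
  if (j : Int) - (i : Int) = n - 2 ∧
     PySem.List.pyGetD s (j : Int) 0 - PySem.List.pyGetD s (i : Int) 0 = n - 2 then 2
  else n - ((j : Int) - (i : Int) + 1)

def numMovesStonesII_alt (stones : List Int) : List Int :=
  let s := PySem.List.sorted stones (fun x => x)
  let n : Int := (s.length : Int)
  let max_moves := max (PySem.List.pyGetD s (n - 1) 0 - PySem.List.pyGetD s 1 0)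
                       (PySem.List.pyGetD s (n - 2) 0 - PySem.List.pyGetD s 0 0) - (n - 2)
  [pyMin1 ((List.range s.length).map (windowCost s n)), max_moves]

-- ===== PRECONDITION & SPEC =====
-- Python A raises IndexError (stones[1] or stones[-1] on a too-short list) when len(stones) < 2
def Pre_numMovesStonesII (stones : List Int) : Prop := 2 ≤ stones.length
instance (stones : List Int) : Decidable (Pre_numMovesStonesII stones) := by
  unfold Pre_numMovesStonesII; infer_instance
def pvWitness_numMovesStonesII : List Int := [5, 1, 2]

def Spec_numMovesStonesII (stones : List Int) (out : List Int) : Prop := out = numMovesStonesII_alt stones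
instance (stones : List Int) (out : List Int) : Decidable (Spec_numMovesStonesII stones out) := by unfold Spec_numMovesStonesII; infer_instance

-- ===== CLAIM (what is proved, stated in full; the proofs are below) =====
def Claim_equal_numMovesStonesII : Prop := ∀ (stones : List Int), Dom_numMovesStonesII stones → Pre_numMovesStonesII stones → Spec_numMovesStonesII stones (numMovesStonesII stones)

-- ===== LEMMAS AND PROOFS =====

theorem pvWitness_ok :
    Dom_numMovesStonesII pvWitness_numMovesStonesII ∧
    Pre_numMovesStonesII pvWitness_numMovesStonesII := by decide

theorem pyGetD_elt (s : List Int) (j : Nat) (hj : j < s.length) :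
    PySem.List.pyGetD s (j : Int) 0 = s[j] := by
  simp [PySem.List.pyGetD_natCast, List.getElem?_eq_getElem hj]

-- abbreviation used only in the proofs: the bisect_left index B computes for right boundary j
def tIdx (s : List Int) (n : Int) (j : Nat) : Nat :=
  PySem.List.bisectLeft s (PySem.List.pyGetD s (j : Int) 0 - n + 1)

theorem tIdx_le_length (s : List Int) (n : Int) (j : Nat)
    (hs : s.Pairwise (· ≤ ·)) : tIdx s n j ≤ s.length :=
  (PySem.List.bisectLeft_spec s _ hs).1

theorem tIdx_le (s : List Int) (hs : s.Pairwise (· ≤ ·)) (_hn : 2 ≤ s.length)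
    (j : Nat) (hj : j < s.length) : tIdx s (s.length : Int) j ≤ j := by
  by_contra h
  push Not at h
  have h2 := (PySem.List.bisectLeft_spec s (PySem.List.pyGetD s (j : Int) 0 - (s.length : Int) + 1) hs).2.1 j hj h
  have : PySem.List.pyGetD s (j : Int) 0 = s[j] := by
    exact pyGetD_elt s _ hj
  omega

theorem tIdx_mono (s : List Int) (hs : s.Pairwise (· ≤ ·)) (n : Int)
    (j : Nat) (hj : j + 1 < s.length) : tIdx s n j ≤ tIdx s n (j + 1) := by
  by_contra h
  push Not at h
  have hjl : j < s.length := by omega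
  have hk : tIdx s n (j + 1) < s.length := lt_of_lt_of_le h (tIdx_le_length s n j hs)
  have h2 := (PySem.List.bisectLeft_spec s (PySem.List.pyGetD s (j : Int) 0 - n + 1) hs).2.1 _ hk h
  have h3 := (PySem.List.bisectLeft_spec s (PySem.List.pyGetD s ((j + 1 : Nat) : Int) 0 - n + 1) hs).2.2 _ hk (le_refl _)
  have hjj : s[j] ≤ s[j + 1] := List.pairwise_iff_getElem.mp hs j (j+1) hjl hj (by omega)
  have e1 : PySem.List.pyGetD s (j : Int) 0 = s[j] := by
    exact pyGetD_elt s _ hjl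
  have e2 : PySem.List.pyGetD s ((j + 1 : Nat) : Int) 0 = s[j + 1] := pyGetD_elt s _ hj
  omega

-- the while loop, started at or left of the bisect_left index, stops exactly there
theorem advA_eq (s : List Int) (hs : s.Pairwise (· ≤ ·)) (hn : 2 ≤ s.length)
    (j : Nat) (hj : j < s.length) :
    ∀ (fuel i₀ : Nat), i₀ ≤ tIdx s (s.length : Int) j →
      tIdx s (s.length : Int) j - i₀ ≤ fuel →
      advA s (s.length : Int) j fuel i₀ = tIdx s (s.length : Int) j := by
  intro fuel
  induction fuel with
  | zero =>
    intro i₀ h1 h2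
    simp [advA]
    omega
  | succ m ih =>
    intro i₀ h1 h2
    rcases eq_or_lt_of_le h1 with he | hlt
    · -- i₀ = tIdx: condition is false, stop
      have ht : tIdx s (s.length : Int) j ≤ j := tIdx_le s hs hn j hj
      have hi : i₀ < s.length := by omega
      have h3 := (PySem.List.bisectLeft_spec s (PySem.List.pyGetD s (j : Int) 0 - (s.length : Int) + 1) hs).2.2 i₀ hi (le_of_eq he.symm)
      have e1 : PySem.List.pyGetD s (j : Int) 0 = s[j] := by
        exact pyGetD_elt s _ hj
      have e2 : PySem.List.pyGetD s (i₀ : Int) 0 = s[i₀] := by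
        exact pyGetD_elt s _ hi
      simp only [advA]
      rw [if_neg (by omega)]
      exact he
    · -- i₀ < tIdx: condition is true, advance
      have hi : i₀ < s.length := lt_of_lt_of_le hlt (tIdx_le_length s _ j hs)
      have h3 := (PySem.List.bisectLeft_spec s (PySem.List.pyGetD s (j : Int) 0 - (s.length : Int) + 1) hs).2.1 i₀ hi hlt
      have e2 : PySem.List.pyGetD s (i₀ : Int) 0 = s[i₀] := by
        exact pyGetD_elt s _ hi
      simp only [advA]
      rw [if_pos (by omega)]
      exact ih (i₀ + 1) hlt (by omega)

theorem windowCost_eq (s : List Int) (n : Int) (j : Nat) :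
    windowCost s n j =
      if (j : Int) - ((tIdx s n j : Nat) : Int) = n - 2 ∧
         PySem.List.pyGetD s (j : Int) 0 - PySem.List.pyGetD s ((tIdx s n j : Nat) : Int) 0 = n - 2
      then 2 else n - ((j : Int) - ((tIdx s n j : Nat) : Int) + 1) := rfl

theorem windowCost_le (s : List Int) (hs : s.Pairwise (· ≤ ·)) (hn : 2 ≤ s.length)
    (j : Nat) (hj : j < s.length) : windowCost s (s.length : Int) j ≤ (s.length : Int) := by
  have ht : tIdx s (s.length : Int) j ≤ j := tIdx_le s hs hn j hj
  have ht' : ((tIdx s (s.length : Int) j : Nat) : Int) ≤ (j : Int) := by exact_mod_cast ht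
  rw [windowCost_eq]
  split_ifs with h
  · omega
  · omega

-- A's loop step, written with explicit state
def stepA (s : List Int) (n : Int) (st : Nat × Int) (j : Nat) : Nat × Int :=
  let i := advA s n j s.length st.1
  if PySem.List.pyGetD s (j : Int) 0 - PySem.List.pyGetD s (i : Int) 0 = n - 2 ∧
     (j : Int) - (i : Int) = n - 2 then (i, min st.2 2)
  else (i, min st.2 (n - ((j : Int) - (i : Int) + 1)))

theorem stepA_eq (s : List Int) (hs : s.Pairwise (· ≤ ·)) (hn : 2 ≤ s.length)
    (j : Nat) (hj : j < s.length) (i₀ : Nat) (m : Int) (hi : i₀ ≤ tIdx s (s.length : Int) j) :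
    stepA s (s.length : Int) (i₀, m) j
      = (tIdx s (s.length : Int) j, min m (windowCost s (s.length : Int) j)) := by
  have hadv : advA s (s.length : Int) j s.length i₀ = tIdx s (s.length : Int) j :=
    advA_eq s hs hn j hj s.length i₀ hi
      (by have := tIdx_le_length s (s.length : Int) j hs; omega)
  unfold stepA windowCost
  simp only [hadv, tIdx]
  split_ifs with h1 h2 h2
  · rfl
  · exact absurd ⟨h1.2, h1.1⟩ h2
  · exact absurd ⟨h2.2, h2.1⟩ h1
  · rfl

theorem foldA_eq (s : List Int) (hs : s.Pairwise (· ≤ ·)) (hn : 2 ≤ s.length) :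
    ∀ (k : Nat), 0 < k → k ≤ s.length →
      (List.range k).foldl (stepA s (s.length : Int)) (0, (s.length : Int))
        = (tIdx s (s.length : Int) (k - 1),
           (List.range k).foldl (fun m j => min m (windowCost s (s.length : Int) j)) (s.length : Int)) := by
  intro k
  induction k with
  | zero => intro h; omega
  | succ m ih =>
    intro _ hk
    rcases Nat.eq_zero_or_pos m with hm | hm
    · subst hm
      simp only [List.range_succ, List.range_zero, List.nil_append, List.foldl_cons, List.foldl_nil]
      rw [stepA_eq s hs hn 0 (by omega) 0 _ (Nat.zero_le _)]
    · rw [List.range_succ, List.foldl_append, List.foldl_append,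
        ih hm (by omega)]
      simp only [List.foldl_cons, List.foldl_nil]
      rw [stepA_eq s hs hn m (by omega) _ _ ?_]
      · simp
      · have hm1 : m - 1 + 1 = m := by omega
        have hmono := tIdx_mono s hs (s.length : Int) (m - 1) (by omega)
        rwa [hm1] at hmono

theorem foldl_min_comm (l : List Int) : ∀ (a b : Int), l.foldl min (min a b) = min a (l.foldl min b) := by
  induction l with
  | nil => intro a b; simp
  | cons h t ih =>
    intro a b
    simp only [List.foldl_cons, min_assoc, ih]

theorem foldl_min_le (l : List Int) : ∀ (b : Int), l.foldl min b ≤ b := by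
  induction l with
  | nil => intro b; simp
  | cons h t ih =>
    intro b
    calc (h :: t).foldl min b = t.foldl min (min b h) := rfl
    _ ≤ min b h := ih _
    _ ≤ b := min_le_left _ _

-- min over all window costs with initial value n drops the n (every cost is ≤ n)
theorem min_costs_eq (s : List Int) (hs : s.Pairwise (· ≤ ·)) (hn : 2 ≤ s.length) :
    (List.range s.length).foldl (fun m j => min m (windowCost s (s.length : Int) j)) (s.length : Int)
      = pyMin1 ((List.range s.length).map (windowCost s (s.length : Int))) := by
  obtain ⟨L, hL⟩ : ∃ L, s.length = L + 1 := ⟨s.length - 1, by omega⟩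
  have hfold : ∀ (l : List Nat) (a : Int),
      l.foldl (fun m j => min m (windowCost s (s.length : Int) j)) a
        = (l.map (windowCost s (s.length : Int))).foldl min a := by
    intro l a; rw [List.foldl_map]
  rw [hfold]
  have hr : List.range s.length = 0 :: (List.range L).map Nat.succ := by
    rw [hL, List.range_succ_eq_map]
  rw [hr]
  simp only [List.map_cons, List.foldl_cons, pyMin1]
  have h0 : windowCost s (s.length : Int) 0 ≤ (s.length : Int) :=
    windowCost_le s hs hn 0 (by omega)
  rw [foldl_min_comm (((List.range L).map Nat.succ).map (windowCost s (s.length : Int)))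
    (s.length : Int) (windowCost s (s.length : Int) 0)]
  have hle := foldl_min_le (((List.range L).map Nat.succ).map (windowCost s (s.length : Int)))
    (windowCost s (s.length : Int) 0)
  exact min_eq_right (le_trans hle h0)

-- ===== VERDICT (by name: the statement is the Claim_ definition above) =====
theorem numMovesStonesII_spec : Claim_equal_numMovesStonesII := by
  intro stones _ hpre
  unfold Spec_numMovesStonesII numMovesStonesII numMovesStonesII_alt
  have hs : (PySem.List.sorted stones (fun x => x)).Pairwise (· ≤ ·) := by
    simpa using PySem.List.sorted_pairwise stones (fun x => x)
  set s := PySem.List.sorted stones (fun x => x) with hsdef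
  have hlen : s.length = stones.length := by
    simp [hsdef, PySem.List.length_sorted]
  have hn : 2 ≤ s.length := by rw [hlen]; exact hpre
  have hfold := foldA_eq s hs hn s.length (by omega) (le_refl _)
  simp only []
  refine List.cons_eq_cons.mpr ⟨?_, List.cons_eq_cons.mpr ⟨?_, rfl⟩⟩
  · show ((List.range s.length).foldl (stepA s (s.length : Int)) (0, (s.length : Int))).2
        = pyMin1 ((List.range s.length).map (windowCost s (s.length : Int)))
    rw [hfold]
    exact min_costs_eq s hs hn
  · exact max_sub_sub_right _ _ _
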